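-- pv_equiv track=rewrite | github.com/erschumb/evolutionary_RG_signal_classifier | src/analysis_visualization/substitution_matrix_analysis.py | _group_slices
-- ===== SOURCE A (Python) =====
-- AA_GROUPS = {
--     "R": "Pos", "K": "Pos", "H": "Pos",
--     "D": "Neg", "E": "Neg",
--     "S": "Polar", "T": "Polar", "N": "Polar", "Q": "Polar",
--     "F": "Aromatic", "W": "Aromatic", "Y": "Aromatic",
--     "A": "Hydrophobic", "V": "Hydrophobic", "I": "Hydrophobic",
--     "L": "Hydrophobic", "M": "Hydrophobic",
--     "G": "C/G/P", "P": "C/G/P", "C": "C/G/P",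
-- }
--
-- def _group_slices(order: list[str], groups: list[str]) -> dict:
--     """Return {group_name: (start_idx, end_idx_inclusive)} for drawing boxes."""
--     out = {}
--     start = 0
--     for g in groups:
--         aas = [aa for aa in order if AA_GROUPS[aa] == g]
--         if not aas:
--             continue
--         out[g] = (start, start + len(aas) - 1)
--         start += len(aas)
--     return out
-- ===== SOURCE B (Python) =====
-- AA_GROUPS = {
--     "R": "Pos", "K": "Pos", "H": "Pos",
--     "D": "Neg", "E": "Neg",
--     "S": "Polar", "T": "Polar", "N": "Polar", "Q": "Polar",
--     "F": "Aromatic", "W": "Aromatic", "Y": "Aromatic",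
--     "A": "Hydrophobic", "V": "Hydrophobic", "I": "Hydrophobic",
--     "L": "Hydrophobic", "M": "Hydrophobic",
--     "G": "C/G/P", "P": "C/G/P", "C": "C/G/P",
-- }
--
-- def _group_slices(order: list[str], groups: list[str]) -> dict:
--     """Return {group_name: (start_idx, end_idx_inclusive)} for drawing boxes."""
--     # Pass 1: count residues per group in a single scan of order.
--     counts = {}
--     for aa in order:
--         g = AA_GROUPS[aa]
--         counts[g] = counts.get(g, 0) + 1
--     # Pass 2: emit (group, slice) pairs recursively over groups with a running start,
--     # then assemble the dict from the pair list.
--     def emit(gs, start):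
--         if not gs:
--             return []
--         n = counts.get(gs[0], 0)
--         if n == 0:
--             return emit(gs[1:], start)
--         return [(gs[0], (start, start + n - 1))] + emit(gs[1:], start + n)
--     return dict(emit(groups, 0))
-- ===== Notes on version B (the rewrite author's own statement) =====
-- stated objective: faster
-- what changed: Replaces A's per-group filter rescans of order with one counting pass over order into a dict keyed by AA_GROUPS[aa], then a recursive emission over groups with a running start that builds the (group, slice) pair list, assembled into a dict at the end.
-- outside the precondition, e.g. on _group_slices(['Z'], []): A returns {}, B raises KeyError
import Mathlib
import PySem

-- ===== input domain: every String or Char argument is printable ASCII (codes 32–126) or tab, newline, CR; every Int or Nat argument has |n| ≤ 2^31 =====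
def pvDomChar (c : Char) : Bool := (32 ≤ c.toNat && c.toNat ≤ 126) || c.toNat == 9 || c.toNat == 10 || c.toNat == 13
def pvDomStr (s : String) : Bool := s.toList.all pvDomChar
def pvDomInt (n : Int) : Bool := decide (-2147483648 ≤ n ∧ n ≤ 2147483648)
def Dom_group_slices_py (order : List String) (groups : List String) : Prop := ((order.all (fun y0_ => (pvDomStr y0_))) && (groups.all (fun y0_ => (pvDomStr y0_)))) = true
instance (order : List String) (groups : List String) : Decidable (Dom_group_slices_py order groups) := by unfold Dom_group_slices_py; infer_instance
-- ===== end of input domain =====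

-- B replaces A's per-group filter passes over `order` by one counting pass plus a
-- recursive emission pass over `groups`; return-value equivalence only.

-- ===== PORT A =====
def AA_GROUPS : PySem.Dict String String := PySem.Dict.ofList
  [("R", "Pos"), ("K", "Pos"), ("H", "Pos"),
   ("D", "Neg"), ("E", "Neg"),
   ("S", "Polar"), ("T", "Polar"), ("N", "Polar"), ("Q", "Polar"),
   ("F", "Aromatic"), ("W", "Aromatic"), ("Y", "Aromatic"),
   ("A", "Hydrophobic"), ("V", "Hydrophobic"), ("I", "Hydrophobic"),
   ("L", "Hydrophobic"), ("M", "Hydrophobic"),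
   ("G", "C/G/P"), ("P", "C/G/P"), ("C", "C/G/P")]

-- AA_GROUPS[aa]; total via getD — Pre_ guarantees every aa is a key (Python raises KeyError otherwise)
def aaGroup (aa : String) : String := AA_GROUPS.getD aa ""

def group_slices_py (order : List String) (groups : List String) : List (String × Int × Int) :=
  (groups.foldl (fun (st : PySem.Dict String (Int × Int) × Int) g =>
      let aas := order.filter (fun aa => aaGroup aa == g)
      if aas.isEmpty then st
      else (st.1.insert g (st.2, st.2 + (aas.length : Int) - 1), st.2 + (aas.length : Int)))
    (PySem.Dict.empty, 0)).1.items

-- ===== PORT B =====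
-- Source B's inner `emit`: recursion over groups with a running start, emitting pairs
def emitSlices (counts : PySem.Dict String Int) : List String → Int → List (String × Int × Int)
  | [], _ => []
  | g :: gs, start =>
    let n := counts.getD g 0
    if n == 0 then emitSlices counts gs start
    else (g, (start, start + n - 1)) :: emitSlices counts gs (start + n)

def group_slices_py_alt (order : List String) (groups : List String) : List (String × Int × Int) :=
  let counts : PySem.Dict String Int :=
    order.foldl (fun d aa => let g := aaGroup aa; d.insert g (d.getD g 0 + 1)) PySem.Dict.empty
  (PySem.Dict.ofList (emitSlices counts groups 0)).items

-- ===== PRECONDITION & SPEC =====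
-- Pre_ requires every residue of `order` to be a key of AA_GROUPS: on unknown residues A raises
-- KeyError whenever `groups` is nonempty, but when `groups` is empty A skips the scan and
-- accidentally returns {}; B's counting pass raises KeyError there regardless.
def Pre_group_slices_py (order : List String) (groups : List String) : Prop :=
  ∀ aa ∈ order, aa ∈ (["R", "K", "H", "D", "E", "S", "T", "N", "Q", "F", "W", "Y",
                       "A", "V", "I", "L", "M", "G", "P", "C"] : List String)
instance (order : List String) (groups : List String) : Decidable (Pre_group_slices_py order groups) := by unfold Pre_group_slices_py; infer_instance
def pvWitness_group_slices_py : List String × List String := (["R", "K", "D", "A"], ["Pos", "Neg", "Hydrophobic"])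

def Spec_group_slices_py (order : List String) (groups : List String) (out : List (String × Int × Int)) : Prop := out = group_slices_py_alt order groups
instance (order : List String) (groups : List String) (out : List (String × Int × Int)) : Decidable (Spec_group_slices_py order groups out) := by unfold Spec_group_slices_py; infer_instance

-- ===== CLAIM (what is proved, stated in full; the proofs are below) =====
def Claim_equal_group_slices_py : Prop := ∀ (order : List String) (groups : List String), Dom_group_slices_py order groups → Pre_group_slices_py order groups → Spec_group_slices_py order groups (group_slices_py order groups)

-- ===== LEMMAS AND PROOFS =====

-- B's counts dict gives, for any g, exactly the length of A's filter pass over order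
lemma counts_getD_eq (order : List String) (g : String) :
    (order.foldl (fun d aa => let g := aaGroup aa; d.insert g (d.getD g 0 + 1))
        (PySem.Dict.empty : PySem.Dict String Int)).getD g 0
      = ((order.filter (fun aa => aaGroup aa == g)).length : Int) := by
  have hm := List.foldl_map (f := aaGroup)
      (g := fun (d : PySem.Dict String Int) g => d.insert g (d.getD g 0 + 1))
      (l := order) (init := PySem.Dict.empty)
  simp only [] at hm ⊢
  rw [← hm, PySem.Dict.getD_foldl_insert_add_one, PySem.Dict.getD_empty]
  simp [List.count_eq_countP, List.countP_eq_length_filter, BEq.comm, List.filter_map,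
        Function.comp_def]

-- A's fold over groups builds, from any (d, s), exactly the dict obtained by inserting
-- B's emitted pairs into d in order
lemma foldA_eq_insert_emit (order : List String) :
    ∀ (gs : List String) (d : PySem.Dict String (Int × Int)) (s : Int),
      (gs.foldl (fun (st : PySem.Dict String (Int × Int) × Int) g =>
          let aas := order.filter (fun aa => aaGroup aa == g)
          if aas.isEmpty then st
          else (st.1.insert g (st.2, st.2 + (aas.length : Int) - 1), st.2 + (aas.length : Int)))
        (d, s)).1
      = (emitSlices
            (order.foldl (fun d aa => let g := aaGroup aa; d.insert g (d.getD g 0 + 1))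
              PySem.Dict.empty) gs s).foldl
          (fun (d : PySem.Dict String (Int × Int)) p => d.insert p.1 p.2) d := by
  intro gs
  induction gs with
  | nil => intro d s; rfl
  | cons g gs ih =>
    intro d s
    simp only [List.foldl_cons, emitSlices, counts_getD_eq order g]
    split_ifs with h1 h2 h2
    · exact ih d s
    · exact absurd (by simp [List.isEmpty_iff_length_eq_zero.mp h1]) h2
    · rw [List.isEmpty_iff_length_eq_zero] at h1
      exact absurd (by simpa using h2) h1
    · exact ih _ _

-- ===== VERDICT (by name: the statement is the Claim_ definition above) =====
theorem group_slices_py_spec : Claim_equal_group_slices_py := by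
  intro order groups _ _
  unfold Spec_group_slices_py group_slices_py group_slices_py_alt
  rw [foldA_eq_insert_emit order groups PySem.Dict.empty 0]
  rfl
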